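-- pv_equiv track=rewrite | github.com/MrBrantCode/unitest_baseline | mut_generate/mist_train_cf/cf_96070/solution.py | count_unique_characters
-- ===== SOURCE A (Python) =====
-- def count_unique_characters(string):
--     unique_chars = set()
--     in_quotes = False
--     i = 0
--
--     while i < len(string):
--         if string[i] == '"' or string[i] == "'":
--             # Toggle in_quotes flag when a quotation mark is encountered
--             in_quotes = not in_quotes
--             i += 1
--         elif not in_quotes:
--             # If not inside quotation marks, add character to unique_chars set
--             unique_chars.add(string[i])
--             i += 1
--         else:
--             # Skip characters inside quotation marks
--             i += 1
--
--     return len(unique_chars)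
-- ===== SOURCE B (Python) =====
-- def count_unique_characters(string):
--     # quotes_before[i] = how many quote characters occur strictly before index i.
--     quotes_before = [0]
--     for ch in string:
--         quotes_before.append(quotes_before[-1] + (ch in '\'"'))
--     # A character counts iff it is not a quote and it lies outside quotes,
--     # i.e. the number of quotes before it is even.
--     return len({c for i, c in enumerate(string)
--                 if c not in '\'"' and quotes_before[i] % 2 == 0})
-- ===== Notes on version B (the rewrite author's own statement) =====
-- stated objective: alternative
-- what changed: A's index loop with a toggled in_quotes flag is replaced by a prefix-count pass over the string plus a declarative set comprehension keeping a character iff it is not a quote and the number of quote characters before it is even.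
import Mathlib
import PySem

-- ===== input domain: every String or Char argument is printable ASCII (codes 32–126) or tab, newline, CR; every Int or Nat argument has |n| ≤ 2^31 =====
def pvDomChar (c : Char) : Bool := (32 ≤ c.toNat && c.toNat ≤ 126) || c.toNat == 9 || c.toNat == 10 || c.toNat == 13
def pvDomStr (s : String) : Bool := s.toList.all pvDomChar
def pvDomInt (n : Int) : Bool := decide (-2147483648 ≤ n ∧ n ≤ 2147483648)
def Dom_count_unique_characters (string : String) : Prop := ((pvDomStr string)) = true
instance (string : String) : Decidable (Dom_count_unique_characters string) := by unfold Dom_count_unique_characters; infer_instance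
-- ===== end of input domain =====

-- B replaces A's single-pass toggled in_quotes state machine by a prefix count
-- of quotes plus a declarative set comprehension: a character counts iff it is
-- not a quote and the number of quotes before it is even (objective: alternative).

-- ===== PORT A =====
-- while i < len(string): toggle / add / skip — structural recursion over the
-- remaining characters with the same state (unique_chars, in_quotes).
def pvALoop : List Char → PySem.Set Char → Bool → PySem.Set Char
  | [], s, _ => s
  | c :: rest, s, inq =>
    if c = '"' || c = '\'' then pvALoop rest s (!inq)
    else if !inq then pvALoop rest (PySem.Set.add s c) inq
    else pvALoop rest s inq

def count_unique_characters (string : String) : Int :=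
  PySem.Set.len (pvALoop string.toList PySem.Set.empty false)

-- ===== PORT B =====
-- the characters of the quote string '\'"'
def pvQChars : List Char := ['\'', '"']

-- for ch in string: quotes_before.append(quotes_before[-1] + (ch in '\'"'))
-- (quotes_before[-1] never raises: the list starts as [0] and only grows, so
-- pyGetD is exact here; 'ch in <string of single chars>' is char membership)
def pvPrefixLoop : List Char → List Int → List Int
  | [], acc => acc
  | ch :: rest, acc =>
      pvPrefixLoop rest (acc ++ [PySem.List.pyGetD acc (-1) 0 +
        (if pvQChars.contains ch then 1 else 0)])

-- the comprehension's filter: c not in '\'"' and quotes_before[i] % 2 == 0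
-- (quotes_before[i] never raises: i < len(string) < len(quotes_before), so
-- pyGetD is exact here)
def pvBKeep (counts : List Int) (p : Int × Char) : Bool :=
  !(pvQChars.contains p.2) &&
    (PySem.Int.mod (PySem.List.pyGetD counts p.1 0) 2 == 0)

def count_unique_characters_alt (string : String) : Int :=
  let cs := string.toList
  let counts := pvPrefixLoop cs [0]
  PySem.Set.len (PySem.Set.ofList
    (((PySem.List.enumerate cs).filter (pvBKeep counts)).map (·.2)))

-- ===== PRECONDITION & SPEC =====
def Spec_count_unique_characters (string : String) (out : Int) : Prop := out = count_unique_characters_alt string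
instance (string : String) (out : Int) : Decidable (Spec_count_unique_characters string out) := by unfold Spec_count_unique_characters; infer_instance

-- ===== CLAIM (what is proved, stated in full; the proofs are below) =====
def Claim_equal_count_unique_characters : Prop := ∀ (string : String), Dom_count_unique_characters string → Spec_count_unique_characters string (count_unique_characters string)

-- ===== LEMMAS AND PROOFS =====

-- the quote test, in A's form
def pvIsQ (c : Char) : Bool := c = '"' || c = '\''

lemma pvContains_eq_isQ (c : Char) : pvQChars.contains c = pvIsQ c := by
  simp [pvQChars, pvIsQ, Bool.or_comm]

-- the characters A adds, in order, starting from state inq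
def pvOut : Bool → List Char → List Char
  | _, [] => []
  | inq, c :: cs =>
    if pvIsQ c then pvOut (!inq) cs
    else if inq then pvOut inq cs else c :: pvOut inq cs

lemma pvALoop_eq_foldl (cs : List Char) (s : PySem.Set Char) (inq : Bool) :
    pvALoop cs s inq = List.foldl PySem.Set.add s (pvOut inq cs) := by
  induction cs generalizing s inq with
  | nil => rfl
  | cons c rest ih =>
    by_cases hq : pvIsQ c
    · have hq' : (c = '"' || c = '\'') = true := hq
      simp [pvALoop, pvOut, hq, hq', ih]
    · have hq' : ¬ ((c = '"' || c = '\'') = true) := hq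
      cases inq <;> simp [pvALoop, pvOut, hq, hq', ih]

-- the intended value of quotes_before for a processed prefix cs
def pvPrefix (cs : List Char) : List Int :=
  (List.range (cs.length + 1)).map (fun i => ((cs.take i).countP pvIsQ : Int))

lemma pvPrefix_snoc (pre : List Char) (c : Char) :
    pvPrefix (pre ++ [c]) =
      pvPrefix pre ++ [((pre.countP pvIsQ : Int) + (if pvIsQ c then 1 else 0))] := by
  simp only [pvPrefix, List.length_append, List.length_singleton]
  rw [show pre.length + 1 + 1 = (pre.length + 1) + 1 from rfl, List.range_succ,
    List.map_append]
  congr 1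
  · apply List.map_congr_left
    intro i hi
    simp only [List.mem_range] at hi
    rw [List.take_append_of_le_length (by omega)]
  · have ht : List.take (pre.length + 1) (pre ++ [c]) = pre ++ [c] :=
      List.take_of_length_le (by simp)
    cases hq : pvIsQ c <;> simp [ht, List.countP_append, hq]

lemma pvGetD_neg_one (xs : List Int) (x : Int) :
    PySem.List.pyGetD (xs ++ [x]) (-1) 0 = x := by
  simp [PySem.List.pyGetD, PySem.List.pyGet?, PySem.List.pyIdx?]

lemma pvPrefixLoop_spec (cs : List Char) : ∀ pre : List Char,
    pvPrefixLoop cs (pvPrefix pre) = pvPrefix (pre ++ cs) := by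
  induction cs with
  | nil => intro pre; simp [pvPrefixLoop]
  | cons c rest ih =>
    intro pre
    have hlast : PySem.List.pyGetD (pvPrefix pre) (-1) 0 = (pre.countP pvIsQ : Int) := by
      have : pvPrefix pre
          = (List.range pre.length).map (fun i => ((pre.take i).countP pvIsQ : Int))
            ++ [(pre.countP pvIsQ : Int)] := by
        simp [pvPrefix, List.range_succ]
      rw [this, pvGetD_neg_one]
    have step : pvPrefix pre ++ [PySem.List.pyGetD (pvPrefix pre) (-1) 0 +
        (if pvQChars.contains c then 1 else 0)] = pvPrefix (pre ++ [c]) := by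
      rw [hlast, pvContains_eq_isQ, pvPrefix_snoc]
    calc pvPrefixLoop (c :: rest) (pvPrefix pre)
        = pvPrefixLoop rest (pvPrefix (pre ++ [c])) := by rw [pvPrefixLoop, step]
      _ = pvPrefix (pre ++ [c] ++ rest) := ih (pre ++ [c])
      _ = pvPrefix (pre ++ c :: rest) := by simp

-- counts[i] for i < length cs is the number of quotes in the first i characters
lemma pvPrefix_getD (cs : List Char) (n : Nat) (h : n ≤ cs.length) :
    PySem.List.pyGetD (pvPrefix cs) (n : Int) 0 = ((cs.take n).countP pvIsQ : Int) := by
  rw [PySem.List.pyGetD_natCast, pvPrefix, PySem.List.getD_map_range _ _ _ _ (by omega)]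

lemma pvParity (n : Nat) : ((n + 1) % 2 == 1) = !(n % 2 == 1) := by
  rcases Nat.mod_two_eq_zero_or_one n with h | h <;> simp [Nat.add_mod, h]

lemma pvParity0 (n : Nat) : (n % 2 == 0) = !(n % 2 == 1) := by
  rcases Nat.mod_two_eq_zero_or_one n with h | h <;> simp [h]

-- B's filter over the suffix suf of pre ++ suf picks exactly pvOut,
-- started in state "number of quotes in pre is odd"
lemma pvOut_eq_filter (suf pre : List Char) :
    pvOut (pre.countP pvIsQ % 2 == 1) suf =
      ((PySem.List.enumerate suf (pre.length : Int)).filter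
          (pvBKeep (pvPrefix (pre ++ suf)))).map (·.2) := by
  induction suf generalizing pre with
  | nil => simp [PySem.List.enumerate, pvOut]
  | cons c rest ih =>
    have hget : PySem.List.pyGetD (pvPrefix (pre ++ c :: rest)) ((pre.length : Int)) 0
        = (pre.countP pvIsQ : Int) := by
      rw [pvPrefix_getD _ _ (by simp), List.take_append_of_le_length (le_refl _)]
      simp
    have hkeep : pvBKeep (pvPrefix (pre ++ c :: rest)) ((pre.length : Int), c)
        = (!(pvIsQ c) && !(pre.countP pvIsQ % 2 == 1)) := by
      simp only [pvBKeep, hget, pvContains_eq_isQ]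
      have hm : PySem.Int.mod ((pre.countP pvIsQ : Nat) : Int) 2
          = ((pre.countP pvIsQ % 2 : Nat) : Int) := by
        exact_mod_cast PySem.Int.mod_natCast (pre.countP pvIsQ) 2
      rw [hm, ← pvParity0]
      rcases Nat.mod_two_eq_zero_or_one (pre.countP pvIsQ) with h | h <;> simp [h]
    have ihc := ih (pre ++ [c])
    have hlen : ((pre ++ [c]).length : Int) = (pre.length : Int) + 1 := by
      simp
    have happ : pre ++ [c] ++ rest = pre ++ c :: rest := by simp
    rw [hlen, happ] at ihc
    rw [PySem.List.enumerate_cons, List.filter_cons, hkeep]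
    by_cases hq : pvIsQ c
    · have hcount : (pre ++ [c]).countP pvIsQ = pre.countP pvIsQ + 1 := by
        simp [List.countP_append, hq]
      rw [hcount, pvParity] at ihc
      simp [pvOut, hq, ← ihc]
    · have hcount : (pre ++ [c]).countP pvIsQ = pre.countP pvIsQ := by
        simp [List.countP_append, hq]
      rw [hcount] at ihc
      cases hb : (pre.countP pvIsQ % 2 == 1) with
      | true => simp [pvOut, hq, hb, ← ihc]
      | false => simp [pvOut, hq, hb, ← ihc]

-- ===== VERDICT (by name: the statement is the Claim_ definition above) =====
theorem count_unique_characters_spec : Claim_equal_count_unique_characters := by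
  intro s _
  show _ = _
  have hcounts : pvPrefixLoop s.toList [0] = pvPrefix s.toList := by
    have h0 : pvPrefix ([] : List Char) = [0] := rfl
    have := pvPrefixLoop_spec s.toList []
    rwa [h0, List.nil_append] at this
  have h := pvOut_eq_filter s.toList []
  simp only [List.countP_nil, List.length_nil, Nat.cast_zero, List.nil_append] at h
  simp only [count_unique_characters, count_unique_characters_alt, hcounts,
    pvALoop_eq_foldl, PySem.Set.ofList_eq_foldl, ← h]
  rfl
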